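-- pv_equiv track=rewrite | github.com/hauteuar/research_agent | api_streamlit_app.py | detect_mainframe_file_type
-- ===== SOURCE A (Python) =====
-- from typing import Dict, Any, List, Optional, Union, Tuple
--
-- MAINFRAME_FILE_TYPES = {
--     'cobol': {
--         'extensions': ['.cbl', '.cob', '.cobol', '.cpy', '.copybook'],
--         'description': 'COBOL Programs and Copybooks',
--         'mime_types': ['text/plain', 'application/octet-stream'],
--         'agent': 'code_parser'
--     },
--     'jcl': {
--         'extensions': ['.jcl', '.job', '.proc', '.prc'],
--         'description': 'Job Control Language',
--         'mime_types': ['text/plain'],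
--         'agent': 'code_parser'
--     },
--     'pli': {
--         'extensions': ['.pli', '.pl1', '.pls'],
--         'description': 'PL/I Programs',
--         'mime_types': ['text/plain'],
--         'agent': 'code_parser'
--     },
--     'sql': {
--         'extensions': ['.sql', '.db2', '.ddl', '.dml'],
--         'description': 'SQL Scripts',
--         'mime_types': ['text/plain', 'application/sql'],
--         'agent': 'db2_comparator'
--     },
--     'data': {
--         'extensions': ['.dat', '.txt', '.csv', '.tsv', '.fixed'],
--         'description': 'Data Files',
--         'mime_types': ['text/plain', 'text/csv', 'application/octet-stream'],
--         'agent': 'data_loader'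
--     }
-- }
--
-- def detect_mainframe_file_type(filename: str, content: str = None) -> Dict[str, Any]:
--     """Detect mainframe file type from filename and content"""
--     filename_lower = filename.lower()
--
--     # Check by extension first
--     for file_type, info in MAINFRAME_FILE_TYPES.items():
--         for ext in info['extensions']:
--             if filename_lower.endswith(ext.lower()):
--                 return {
--                     'type': file_type,
--                     'description': info['description'],
--                     'agent': info['agent'],
--                     'confidence': 'high'
--                 }
--
--     # Content-based detection if no extension match
--     if content:
--         content_upper = content.upper()
--
--         if any(keyword in content_upper for keyword in ['IDENTIFICATION DIVISION', 'PROGRAM-ID', 'WORKING-STORAGE']):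
--             return {
--                 'type': 'cobol',
--                 'description': 'COBOL Program (detected from content)',
--                 'agent': 'code_parser',
--                 'confidence': 'medium'
--             }
--
--         if any(keyword in content_upper for keyword in ['//JOB ', '//EXEC ', '//DD ']):
--             return {
--                 'type': 'jcl',
--                 'description': 'JCL Job (detected from content)',
--                 'agent': 'code_parser',
--                 'confidence': 'medium'
--             }
--
--         if any(keyword in content_upper for keyword in ['CREATE TABLE', 'SELECT ', 'INSERT INTO']):
--             return {
--                 'type': 'sql',
--                 'description': 'SQL Script (detected from content)',
--                 'agent': 'db2_comparator',
--                 'confidence': 'medium'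
--             }
--
--     return {
--         'type': 'data',
--         'description': 'Generic File',
--         'agent': 'code_parser',
--         'confidence': 'low'
--     }
-- ===== SOURCE B (Python) =====
-- # Reverse scan for the trailing extension + one flat dict lookup, and a flattened
-- # keyword->rule table for the content phase (objective: alternative decomposition).
--
-- _EXT_MAP = {
--     '.cbl': ('cobol', 'COBOL Programs and Copybooks', 'code_parser'),
--     '.cob': ('cobol', 'COBOL Programs and Copybooks', 'code_parser'),
--     '.cobol': ('cobol', 'COBOL Programs and Copybooks', 'code_parser'),
--     '.cpy': ('cobol', 'COBOL Programs and Copybooks', 'code_parser'),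
--     '.copybook': ('cobol', 'COBOL Programs and Copybooks', 'code_parser'),
--     '.jcl': ('jcl', 'Job Control Language', 'code_parser'),
--     '.job': ('jcl', 'Job Control Language', 'code_parser'),
--     '.proc': ('jcl', 'Job Control Language', 'code_parser'),
--     '.prc': ('jcl', 'Job Control Language', 'code_parser'),
--     '.pli': ('pli', 'PL/I Programs', 'code_parser'),
--     '.pl1': ('pli', 'PL/I Programs', 'code_parser'),
--     '.pls': ('pli', 'PL/I Programs', 'code_parser'),
--     '.sql': ('sql', 'SQL Scripts', 'db2_comparator'),
--     '.db2': ('sql', 'SQL Scripts', 'db2_comparator'),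
--     '.ddl': ('sql', 'SQL Scripts', 'db2_comparator'),
--     '.dml': ('sql', 'SQL Scripts', 'db2_comparator'),
--     '.dat': ('data', 'Data Files', 'data_loader'),
--     '.txt': ('data', 'Data Files', 'data_loader'),
--     '.csv': ('data', 'Data Files', 'data_loader'),
--     '.tsv': ('data', 'Data Files', 'data_loader'),
--     '.fixed': ('data', 'Data Files', 'data_loader'),
-- }
--
-- # Flattened: first keyword found in the content decides; group order preserved,
-- # so this yields the same rule as A's grouped any() checks.
-- _KW_RULES = [
--     ('IDENTIFICATION DIVISION', 'cobol', 'COBOL Program (detected from content)', 'code_parser'),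
--     ('PROGRAM-ID', 'cobol', 'COBOL Program (detected from content)', 'code_parser'),
--     ('WORKING-STORAGE', 'cobol', 'COBOL Program (detected from content)', 'code_parser'),
--     ('//JOB ', 'jcl', 'JCL Job (detected from content)', 'code_parser'),
--     ('//EXEC ', 'jcl', 'JCL Job (detected from content)', 'code_parser'),
--     ('//DD ', 'jcl', 'JCL Job (detected from content)', 'code_parser'),
--     ('CREATE TABLE', 'sql', 'SQL Script (detected from content)', 'db2_comparator'),
--     ('SELECT ', 'sql', 'SQL Script (detected from content)', 'db2_comparator'),
--     ('INSERT INTO', 'sql', 'SQL Script (detected from content)', 'db2_comparator'),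
-- ]
--
--
-- def _result(ftype, desc, agent, confidence):
--     return {'type': ftype, 'description': desc, 'agent': agent,
--             'confidence': confidence}
--
--
-- def detect_mainframe_file_type(filename: str, content: str = None) -> dict:
--     """Detect mainframe file type from filename and content"""
--     # Scan the lowercased name from the end to pick out the trailing extension.
--     suffix = []
--     ext = None
--     for ch in reversed(filename.lower()):
--         if ch == '.':
--             ext = '.' + ''.join(reversed(suffix))
--             break
--         suffix.append(ch)
--
--     hit = _EXT_MAP.get(ext) if ext is not None else None
--     if hit is not None:
--         return _result(*hit, 'high')
--
--     if content:
--         cu = content.upper()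
--         for kw, ftype, desc, agent in _KW_RULES:
--             if kw in cu:
--                 return _result(ftype, desc, agent, 'medium')
--
--     return _result('data', 'Generic File', 'code_parser', 'low')
-- ===== Notes on version B (the rewrite author's own statement) =====
-- stated objective: alternative
-- what changed: Replaces A's nested endswith loops over the grouped type table with a reverse scan of the filename that extracts the suffix after the last dot followed by one flat extension->result dict lookup, and flattens the three grouped any() keyword checks into a single first-match pass over a keyword->rule table.
import Mathlib
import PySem

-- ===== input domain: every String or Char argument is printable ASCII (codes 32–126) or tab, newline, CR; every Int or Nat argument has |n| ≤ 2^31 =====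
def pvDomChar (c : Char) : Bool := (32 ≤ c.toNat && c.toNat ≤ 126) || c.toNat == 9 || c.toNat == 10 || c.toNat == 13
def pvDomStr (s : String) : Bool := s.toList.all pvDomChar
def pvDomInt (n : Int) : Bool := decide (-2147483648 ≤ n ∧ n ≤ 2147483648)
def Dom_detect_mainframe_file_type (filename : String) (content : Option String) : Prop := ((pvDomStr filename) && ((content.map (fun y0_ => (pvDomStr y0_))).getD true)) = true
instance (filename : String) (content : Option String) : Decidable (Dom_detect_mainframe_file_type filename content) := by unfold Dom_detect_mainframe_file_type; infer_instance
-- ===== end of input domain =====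

-- B replaces A's nested endswith loops with a reverse scan for the trailing extension
-- plus one flat dict lookup, and flattens the grouped any() keyword checks into one
-- first-match pass over a keyword table (objective: alternative; same observable value).

-- ===== PORT A =====
-- MAINFRAME_FILE_TYPES: only the fields the function reads ('extensions',
-- 'description', 'agent'); the unused heterogeneous 'mime_types' field is dropped.
def MAINFRAME_FILE_TYPES : List (String × List String × String × String) :=
  [ ("cobol", ([".cbl", ".cob", ".cobol", ".cpy", ".copybook"],
       "COBOL Programs and Copybooks", "code_parser")),
    ("jcl", ([".jcl", ".job", ".proc", ".prc"],
       "Job Control Language", "code_parser")),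
    ("pli", ([".pli", ".pl1", ".pls"],
       "PL/I Programs", "code_parser")),
    ("sql", ([".sql", ".db2", ".ddl", ".dml"],
       "SQL Scripts", "db2_comparator")),
    ("data", ([".dat", ".txt", ".csv", ".tsv", ".fixed"],
       "Data Files", "data_loader")) ]

-- inner 'for ext in info["extensions"]' loop with its early return
def pvA_extsLoop (fl : String) (ft desc agent : String) : List String → Option (List (String × String))
  | [] => none
  | ext :: rest =>
      if PySem.Str.endswith fl (PySem.Str.lower ext) then
        some [("type", ft), ("description", desc), ("agent", agent), ("confidence", "high")]
      else pvA_extsLoop fl ft desc agent rest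

-- outer 'for file_type, info in MAINFRAME_FILE_TYPES.items()' loop
def pvA_extLoop (fl : String) : List (String × List String × String × String) → Option (List (String × String))
  | [] => none
  | (ft, exts, desc, agent) :: rest =>
      match pvA_extsLoop fl ft desc agent exts with
      | some r => some r
      | none => pvA_extLoop fl rest

def detect_mainframe_file_type (filename : String) (content : Option String) : List (String × String) :=
  let filename_lower := PySem.Str.lower filename
  match pvA_extLoop filename_lower MAINFRAME_FILE_TYPES with
  | some r => r
  | none =>
    let fromContent : Option (List (String × String)) :=
      match content with
      | none => none
      | some c =>
          if c = "" then none  -- 'if content:' — falsy for None and ""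
          else
            let cu := PySem.Str.upper c
            if PySem.Str.isIn "IDENTIFICATION DIVISION" cu || PySem.Str.isIn "PROGRAM-ID" cu || PySem.Str.isIn "WORKING-STORAGE" cu then
              some [("type", "cobol"), ("description", "COBOL Program (detected from content)"), ("agent", "code_parser"), ("confidence", "medium")]
            else if PySem.Str.isIn "//JOB " cu || PySem.Str.isIn "//EXEC " cu || PySem.Str.isIn "//DD " cu then
              some [("type", "jcl"), ("description", "JCL Job (detected from content)"), ("agent", "code_parser"), ("confidence", "medium")]
            else if PySem.Str.isIn "CREATE TABLE" cu || PySem.Str.isIn "SELECT " cu || PySem.Str.isIn "INSERT INTO" cu then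
              some [("type", "sql"), ("description", "SQL Script (detected from content)"), ("agent", "db2_comparator"), ("confidence", "medium")]
            else none
    match fromContent with
    | some r => r
    | none => [("type", "data"), ("description", "Generic File"), ("agent", "code_parser"), ("confidence", "low")]

-- ===== PORT B =====
-- _EXT_MAP: keys are the lowercase extensions, written as char lists (the form the
-- reverse scan produces)
def pvB_EXT_MAP : PySem.Dict (List Char) (String × String × String) :=
  PySem.Dict.mk
    [ (['.', 'c', 'b', 'l'], ("cobol", "COBOL Programs and Copybooks", "code_parser")),
      (['.', 'c', 'o', 'b'], ("cobol", "COBOL Programs and Copybooks", "code_parser")),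
      (['.', 'c', 'o', 'b', 'o', 'l'], ("cobol", "COBOL Programs and Copybooks", "code_parser")),
      (['.', 'c', 'p', 'y'], ("cobol", "COBOL Programs and Copybooks", "code_parser")),
      (['.', 'c', 'o', 'p', 'y', 'b', 'o', 'o', 'k'], ("cobol", "COBOL Programs and Copybooks", "code_parser")),
      (['.', 'j', 'c', 'l'], ("jcl", "Job Control Language", "code_parser")),
      (['.', 'j', 'o', 'b'], ("jcl", "Job Control Language", "code_parser")),
      (['.', 'p', 'r', 'o', 'c'], ("jcl", "Job Control Language", "code_parser")),
      (['.', 'p', 'r', 'c'], ("jcl", "Job Control Language", "code_parser")),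
      (['.', 'p', 'l', 'i'], ("pli", "PL/I Programs", "code_parser")),
      (['.', 'p', 'l', '1'], ("pli", "PL/I Programs", "code_parser")),
      (['.', 'p', 'l', 's'], ("pli", "PL/I Programs", "code_parser")),
      (['.', 's', 'q', 'l'], ("sql", "SQL Scripts", "db2_comparator")),
      (['.', 'd', 'b', '2'], ("sql", "SQL Scripts", "db2_comparator")),
      (['.', 'd', 'd', 'l'], ("sql", "SQL Scripts", "db2_comparator")),
      (['.', 'd', 'm', 'l'], ("sql", "SQL Scripts", "db2_comparator")),
      (['.', 'd', 'a', 't'], ("data", "Data Files", "data_loader")),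
      (['.', 't', 'x', 't'], ("data", "Data Files", "data_loader")),
      (['.', 'c', 's', 'v'], ("data", "Data Files", "data_loader")),
      (['.', 't', 's', 'v'], ("data", "Data Files", "data_loader")),
      (['.', 'f', 'i', 'x', 'e', 'd'], ("data", "Data Files", "data_loader")) ]

-- _KW_RULES: flattened keyword table, first match wins
def pvB_KW_RULES : List (String × String × String × String) :=
  [ ("IDENTIFICATION DIVISION", "cobol", "COBOL Program (detected from content)", "code_parser"),
    ("PROGRAM-ID", "cobol", "COBOL Program (detected from content)", "code_parser"),
    ("WORKING-STORAGE", "cobol", "COBOL Program (detected from content)", "code_parser"),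
    ("//JOB ", "jcl", "JCL Job (detected from content)", "code_parser"),
    ("//EXEC ", "jcl", "JCL Job (detected from content)", "code_parser"),
    ("//DD ", "jcl", "JCL Job (detected from content)", "code_parser"),
    ("CREATE TABLE", "sql", "SQL Script (detected from content)", "db2_comparator"),
    ("SELECT ", "sql", "SQL Script (detected from content)", "db2_comparator"),
    ("INSERT INTO", "sql", "SQL Script (detected from content)", "db2_comparator") ]

-- _result helper
def pvB_result (ftype desc agent confidence : String) : List (String × String) :=
  [("type", ftype), ("description", desc), ("agent", agent), ("confidence", confidence)]

-- 'for ch in reversed(filename.lower()): …' — the reverse scan, carrying the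
-- collected suffix (kept in forward order; Python re-reverses it at the break)
def pvB_scanRev : List Char → List Char → Option (List Char)
  | [], _ => none
  | c :: cs, acc => if c = '.' then some ('.' :: acc) else pvB_scanRev cs (c :: acc)

def pvB_extOf (fl : List Char) : Option (List Char) :=
  pvB_scanRev fl.reverse []

def detect_mainframe_file_type_alt (filename : String) (content : Option String) : List (String × String) :=
  let hit : Option (String × String × String) :=
    match pvB_extOf (PySem.Str.lower filename).toList with
    | some e => pvB_EXT_MAP.get? e
    | none => none
  match hit with
  | some r => pvB_result r.1 r.2.1 r.2.2 "high"
  | none =>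
    let kwHit : Option (String × String × String × String) :=
      match content with
      | none => none
      | some c =>
          if c = "" then none  -- 'if content:'
          else pvB_KW_RULES.find? (fun r => PySem.Str.isIn r.1 (PySem.Str.upper c))
    match kwHit with
    | some r => pvB_result r.2.1 r.2.2.1 r.2.2.2 "medium"
    | none => pvB_result "data" "Generic File" "code_parser" "low"

-- ===== PRECONDITION & SPEC =====
def Spec_detect_mainframe_file_type (filename : String) (content : Option String) (out : List (String × String)) : Prop := out = detect_mainframe_file_type_alt filename content
instance (filename : String) (content : Option String) (out : List (String × String)) : Decidable (Spec_detect_mainframe_file_type filename content out) := by unfold Spec_detect_mainframe_file_type; infer_instance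

-- ===== CLAIM (what is proved, stated in full; the proofs are below) =====
def Claim_equal_detect_mainframe_file_type : Prop := ∀ (filename : String) (content : Option String), Dom_detect_mainframe_file_type filename content → Spec_detect_mainframe_file_type filename content (detect_mainframe_file_type filename content)

-- ===== LEMMAS AND PROOFS =====

-- the reverse scan on u ++ '.' :: rest with '.' ∉ u stops at the dot
theorem scanRev_of (u : List Char) (h : '.' ∉ u) (rest acc : List Char) :
    pvB_scanRev (u ++ '.' :: rest) acc = some ('.' :: (u.reverse ++ acc)) := by
  induction u generalizing acc with
  | nil => simp [pvB_scanRev]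
  | cons c cs ih =>
      simp only [List.mem_cons, not_or] at h
      simp only [List.cons_append, pvB_scanRev, if_neg (fun hc : c = '.' => h.1 hc.symm)]
      rw [ih h.2]
      simp

-- a successful reverse scan characterized
theorem scanRev_some (r : List Char) (acc e : List Char) (h : pvB_scanRev r acc = some e) :
    ∃ u rest, r = u ++ '.' :: rest ∧ '.' ∉ u ∧ e = '.' :: (u.reverse ++ acc) := by
  induction r generalizing acc with
  | nil => simp [pvB_scanRev] at h
  | cons c cs ih =>
      by_cases hc : c = '.'
      · subst hc
        simp [pvB_scanRev] at h
        exact ⟨[], cs, by simp, by simp, by simp [← h]⟩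
      · simp only [pvB_scanRev, if_neg hc] at h
        obtain ⟨u, rest, hr, hu, he⟩ := ih (c :: acc) h
        refine ⟨c :: u, rest, by simp [hr], ?_, by simp [he]⟩
        simp only [List.mem_cons, not_or]
        exact ⟨fun hcc => hc hcc.symm, hu⟩

theorem extOf_of_suffix (p t : List Char) (h : '.' ∉ t) :
    pvB_extOf (p ++ '.' :: t) = some ('.' :: t) := by
  unfold pvB_extOf
  have hrev : (p ++ '.' :: t).reverse = t.reverse ++ '.' :: p.reverse := by simp
  rw [hrev, scanRev_of t.reverse (by simp [h]) p.reverse []]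
  simp

theorem extOf_some (l e : List Char) (h : pvB_extOf l = some e) :
    ∃ p t, l = p ++ '.' :: t ∧ '.' ∉ t ∧ e = '.' :: t := by
  obtain ⟨u, rest, hr, hu, he⟩ := scanRev_some l.reverse [] e h
  refine ⟨rest.reverse, u.reverse, ?_, by simp [hu], by simp [he]⟩
  have := congrArg List.reverse hr
  simpa using this

-- the key bridge: for a dot-headed, dot-free-tailed extension, 'endswith' is
-- exactly 'the reverse scan returns that extension'
theorem endswith_iff_extOf (l t : List Char) (h : '.' ∉ t) :
    PySem.Chars.endswith l ('.' :: t) = true ↔ pvB_extOf l = some ('.' :: t) := by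
  rw [PySem.Chars.endswith_iff]
  constructor
  · rintro ⟨p, rfl⟩
    exact extOf_of_suffix p t h
  · intro hs
    obtain ⟨p, t', hl, _, he⟩ := extOf_some l _ hs
    obtain ⟨rfl⟩ : t' = t := by cases he; rfl
    exact ⟨p, hl.symm⟩

theorem endswith_eq_decide (l t : List Char) (h : '.' ∉ t) :
    PySem.Chars.endswith l ('.' :: t) = decide (pvB_extOf l = some ('.' :: t)) := by
  by_cases hx : pvB_extOf l = some ('.' :: t)
  · simp [hx, (endswith_iff_extOf l t h).2 hx]
  · simp only [hx, decide_false]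
    by_contra hne
    exact hx ((endswith_iff_extOf l t h).1 (by revert hne; cases PySem.Chars.endswith l ('.' :: t) <;> simp))

-- extension phase of A equals extension phase of B
set_option maxHeartbeats 4000000 in
theorem ext_phase_eq (fl : String) :
    pvA_extLoop fl MAINFRAME_FILE_TYPES
      = (match (match pvB_extOf fl.toList with
                | some e => pvB_EXT_MAP.get? e
                | none => none) with
         | some r => some (pvB_result r.1 r.2.1 r.2.2 "high")
         | none => none) := by
  simp only [MAINFRAME_FILE_TYPES, pvA_extLoop, pvA_extsLoop, PySem.Str.endswith_eq]
  simp only [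
    show (PySem.Str.lower ".cbl").toList = ['.', 'c', 'b', 'l'] from rfl,
    show (PySem.Str.lower ".cob").toList = ['.', 'c', 'o', 'b'] from rfl,
    show (PySem.Str.lower ".cobol").toList = ['.', 'c', 'o', 'b', 'o', 'l'] from rfl,
    show (PySem.Str.lower ".cpy").toList = ['.', 'c', 'p', 'y'] from rfl,
    show (PySem.Str.lower ".copybook").toList = ['.', 'c', 'o', 'p', 'y', 'b', 'o', 'o', 'k'] from rfl,
    show (PySem.Str.lower ".jcl").toList = ['.', 'j', 'c', 'l'] from rfl,
    show (PySem.Str.lower ".job").toList = ['.', 'j', 'o', 'b'] from rfl,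
    show (PySem.Str.lower ".proc").toList = ['.', 'p', 'r', 'o', 'c'] from rfl,
    show (PySem.Str.lower ".prc").toList = ['.', 'p', 'r', 'c'] from rfl,
    show (PySem.Str.lower ".pli").toList = ['.', 'p', 'l', 'i'] from rfl,
    show (PySem.Str.lower ".pl1").toList = ['.', 'p', 'l', '1'] from rfl,
    show (PySem.Str.lower ".pls").toList = ['.', 'p', 'l', 's'] from rfl,
    show (PySem.Str.lower ".sql").toList = ['.', 's', 'q', 'l'] from rfl,
    show (PySem.Str.lower ".db2").toList = ['.', 'd', 'b', '2'] from rfl,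
    show (PySem.Str.lower ".ddl").toList = ['.', 'd', 'd', 'l'] from rfl,
    show (PySem.Str.lower ".dml").toList = ['.', 'd', 'm', 'l'] from rfl,
    show (PySem.Str.lower ".dat").toList = ['.', 'd', 'a', 't'] from rfl,
    show (PySem.Str.lower ".txt").toList = ['.', 't', 'x', 't'] from rfl,
    show (PySem.Str.lower ".csv").toList = ['.', 'c', 's', 'v'] from rfl,
    show (PySem.Str.lower ".tsv").toList = ['.', 't', 's', 'v'] from rfl,
    show (PySem.Str.lower ".fixed").toList = ['.', 'f', 'i', 'x', 'e', 'd'] from rfl]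
  simp only [
    endswith_eq_decide fl.toList ['c', 'b', 'l'] (by decide),
    endswith_eq_decide fl.toList ['c', 'o', 'b'] (by decide),
    endswith_eq_decide fl.toList ['c', 'o', 'b', 'o', 'l'] (by decide),
    endswith_eq_decide fl.toList ['c', 'p', 'y'] (by decide),
    endswith_eq_decide fl.toList ['c', 'o', 'p', 'y', 'b', 'o', 'o', 'k'] (by decide),
    endswith_eq_decide fl.toList ['j', 'c', 'l'] (by decide),
    endswith_eq_decide fl.toList ['j', 'o', 'b'] (by decide),
    endswith_eq_decide fl.toList ['p', 'r', 'o', 'c'] (by decide),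
    endswith_eq_decide fl.toList ['p', 'r', 'c'] (by decide),
    endswith_eq_decide fl.toList ['p', 'l', 'i'] (by decide),
    endswith_eq_decide fl.toList ['p', 'l', '1'] (by decide),
    endswith_eq_decide fl.toList ['p', 'l', 's'] (by decide),
    endswith_eq_decide fl.toList ['s', 'q', 'l'] (by decide),
    endswith_eq_decide fl.toList ['d', 'b', '2'] (by decide),
    endswith_eq_decide fl.toList ['d', 'd', 'l'] (by decide),
    endswith_eq_decide fl.toList ['d', 'm', 'l'] (by decide),
    endswith_eq_decide fl.toList ['d', 'a', 't'] (by decide),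
    endswith_eq_decide fl.toList ['t', 'x', 't'] (by decide),
    endswith_eq_decide fl.toList ['c', 's', 'v'] (by decide),
    endswith_eq_decide fl.toList ['t', 's', 'v'] (by decide),
    endswith_eq_decide fl.toList ['f', 'i', 'x', 'e', 'd'] (by decide)]
  cases hE : pvB_extOf fl.toList with
  | none => simp
  | some e =>
      simp only [pvB_EXT_MAP, PySem.Dict.get?_mk_cons, beq_iff_eq, Option.some.injEq, decide_eq_true_eq,
    show (['.', 'c', 'b', 'l'] = e) ↔ (e = ['.', 'c', 'b', 'l']) from eq_comm,
    show (['.', 'c', 'o', 'b'] = e) ↔ (e = ['.', 'c', 'o', 'b']) from eq_comm,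
    show (['.', 'c', 'o', 'b', 'o', 'l'] = e) ↔ (e = ['.', 'c', 'o', 'b', 'o', 'l']) from eq_comm,
    show (['.', 'c', 'p', 'y'] = e) ↔ (e = ['.', 'c', 'p', 'y']) from eq_comm,
    show (['.', 'c', 'o', 'p', 'y', 'b', 'o', 'o', 'k'] = e) ↔ (e = ['.', 'c', 'o', 'p', 'y', 'b', 'o', 'o', 'k']) from eq_comm,
    show (['.', 'j', 'c', 'l'] = e) ↔ (e = ['.', 'j', 'c', 'l']) from eq_comm,
    show (['.', 'j', 'o', 'b'] = e) ↔ (e = ['.', 'j', 'o', 'b']) from eq_comm,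
    show (['.', 'p', 'r', 'o', 'c'] = e) ↔ (e = ['.', 'p', 'r', 'o', 'c']) from eq_comm,
    show (['.', 'p', 'r', 'c'] = e) ↔ (e = ['.', 'p', 'r', 'c']) from eq_comm,
    show (['.', 'p', 'l', 'i'] = e) ↔ (e = ['.', 'p', 'l', 'i']) from eq_comm,
    show (['.', 'p', 'l', '1'] = e) ↔ (e = ['.', 'p', 'l', '1']) from eq_comm,
    show (['.', 'p', 'l', 's'] = e) ↔ (e = ['.', 'p', 'l', 's']) from eq_comm,
    show (['.', 's', 'q', 'l'] = e) ↔ (e = ['.', 's', 'q', 'l']) from eq_comm,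
    show (['.', 'd', 'b', '2'] = e) ↔ (e = ['.', 'd', 'b', '2']) from eq_comm,
    show (['.', 'd', 'd', 'l'] = e) ↔ (e = ['.', 'd', 'd', 'l']) from eq_comm,
    show (['.', 'd', 'm', 'l'] = e) ↔ (e = ['.', 'd', 'm', 'l']) from eq_comm,
    show (['.', 'd', 'a', 't'] = e) ↔ (e = ['.', 'd', 'a', 't']) from eq_comm,
    show (['.', 't', 'x', 't'] = e) ↔ (e = ['.', 't', 'x', 't']) from eq_comm,
    show (['.', 'c', 's', 'v'] = e) ↔ (e = ['.', 'c', 's', 'v']) from eq_comm,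
    show (['.', 't', 's', 'v'] = e) ↔ (e = ['.', 't', 's', 'v']) from eq_comm,
    show (['.', 'f', 'i', 'x', 'e', 'd'] = e) ↔ (e = ['.', 'f', 'i', 'x', 'e', 'd']) from eq_comm]
      by_cases h0 : e = ['.', 'c', 'b', 'l']
      · simp [h0, pvB_result]
      simp only [if_neg h0]
      by_cases h1 : e = ['.', 'c', 'o', 'b']
      · simp [h1, pvB_result]
      simp only [if_neg h1]
      by_cases h2 : e = ['.', 'c', 'o', 'b', 'o', 'l']
      · simp [h2, pvB_result]
      simp only [if_neg h2]
      by_cases h3 : e = ['.', 'c', 'p', 'y']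
      · simp [h3, pvB_result]
      simp only [if_neg h3]
      by_cases h4 : e = ['.', 'c', 'o', 'p', 'y', 'b', 'o', 'o', 'k']
      · simp [h4, pvB_result]
      simp only [if_neg h4]
      by_cases h5 : e = ['.', 'j', 'c', 'l']
      · simp [h5, pvB_result]
      simp only [if_neg h5]
      by_cases h6 : e = ['.', 'j', 'o', 'b']
      · simp [h6, pvB_result]
      simp only [if_neg h6]
      by_cases h7 : e = ['.', 'p', 'r', 'o', 'c']
      · simp [h7, pvB_result]
      simp only [if_neg h7]
      by_cases h8 : e = ['.', 'p', 'r', 'c']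
      · simp [h8, pvB_result]
      simp only [if_neg h8]
      by_cases h9 : e = ['.', 'p', 'l', 'i']
      · simp [h9, pvB_result]
      simp only [if_neg h9]
      by_cases h10 : e = ['.', 'p', 'l', '1']
      · simp [h10, pvB_result]
      simp only [if_neg h10]
      by_cases h11 : e = ['.', 'p', 'l', 's']
      · simp [h11, pvB_result]
      simp only [if_neg h11]
      by_cases h12 : e = ['.', 's', 'q', 'l']
      · simp [h12, pvB_result]
      simp only [if_neg h12]
      by_cases h13 : e = ['.', 'd', 'b', '2']
      · simp [h13, pvB_result]
      simp only [if_neg h13]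
      by_cases h14 : e = ['.', 'd', 'd', 'l']
      · simp [h14, pvB_result]
      simp only [if_neg h14]
      by_cases h15 : e = ['.', 'd', 'm', 'l']
      · simp [h15, pvB_result]
      simp only [if_neg h15]
      by_cases h16 : e = ['.', 'd', 'a', 't']
      · simp [h16, pvB_result]
      simp only [if_neg h16]
      by_cases h17 : e = ['.', 't', 'x', 't']
      · simp [h17, pvB_result]
      simp only [if_neg h17]
      by_cases h18 : e = ['.', 'c', 's', 'v']
      · simp [h18, pvB_result]
      simp only [if_neg h18]
      by_cases h19 : e = ['.', 't', 's', 'v']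
      · simp [h19, pvB_result]
      simp only [if_neg h19]
      by_cases h20 : e = ['.', 'f', 'i', 'x', 'e', 'd']
      · simp [h20, pvB_result]
      simp only [if_neg h20]
      rfl

-- content phase of A equals B's flattened first-match pass
theorem content_phase_eq (cu : String) :
    (if PySem.Str.isIn "IDENTIFICATION DIVISION" cu || PySem.Str.isIn "PROGRAM-ID" cu || PySem.Str.isIn "WORKING-STORAGE" cu then
       some [("type", "cobol"), ("description", "COBOL Program (detected from content)"), ("agent", "code_parser"), ("confidence", "medium")]
     else if PySem.Str.isIn "//JOB " cu || PySem.Str.isIn "//EXEC " cu || PySem.Str.isIn "//DD " cu then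
       some [("type", "jcl"), ("description", "JCL Job (detected from content)"), ("agent", "code_parser"), ("confidence", "medium")]
     else if PySem.Str.isIn "CREATE TABLE" cu || PySem.Str.isIn "SELECT " cu || PySem.Str.isIn "INSERT INTO" cu then
       some [("type", "sql"), ("description", "SQL Script (detected from content)"), ("agent", "db2_comparator"), ("confidence", "medium")]
     else none)
    = (match pvB_KW_RULES.find? (fun r => PySem.Str.isIn r.1 cu) with
       | some r => some (pvB_result r.2.1 r.2.2.1 r.2.2.2 "medium")
       | none => none) := by
  simp only [pvB_KW_RULES, List.find?_cons, List.find?_nil]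
  cases k1 : PySem.Str.isIn "IDENTIFICATION DIVISION" cu
  case true => simp only [k1]; simp [pvB_result]
  case false =>
    simp only [k1]
    cases k2 : PySem.Str.isIn "PROGRAM-ID" cu
    case true => simp only [k2]; simp [pvB_result]
    case false =>
      simp only [k2]
      cases k3 : PySem.Str.isIn "WORKING-STORAGE" cu
      case true => simp only [k3]; simp [pvB_result]
      case false =>
        simp only [k3]
        cases k4 : PySem.Str.isIn "//JOB " cu
        case true => simp only [k4]; simp [pvB_result]
        case false =>
          simp only [k4]
          cases k5 : PySem.Str.isIn "//EXEC " cu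
          case true => simp only [k5]; simp [pvB_result]
          case false =>
            simp only [k5]
            cases k6 : PySem.Str.isIn "//DD " cu
            case true => simp only [k6]; simp [pvB_result]
            case false =>
              simp only [k6]
              cases k7 : PySem.Str.isIn "CREATE TABLE" cu
              case true => simp only [k7]; simp [pvB_result]
              case false =>
                simp only [k7]
                cases k8 : PySem.Str.isIn "SELECT " cu
                case true => simp only [k8]; simp [pvB_result]
                case false =>
                  simp only [k8]
                  cases k9 : PySem.Str.isIn "INSERT INTO" cu
                  case true => simp only [k9]; simp [pvB_result]
                  case false =>
                    simp only [k9]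
                    simp

-- ===== VERDICT (by name: the statement is the Claim_ definition above) =====
theorem detect_mainframe_file_type_spec : Claim_equal_detect_mainframe_file_type := by
  intro filename content _
  unfold Spec_detect_mainframe_file_type
  show detect_mainframe_file_type filename content = _
  simp only [detect_mainframe_file_type, detect_mainframe_file_type_alt]
  rw [ext_phase_eq]
  cases hE : pvB_extOf (PySem.Str.lower filename).toList with
  | some e =>
      simp only [hE]
      cases hG : pvB_EXT_MAP.get? e with
      | some r => simp
      | none =>
          simp only [hG]
          cases content with
          | none => simp [pvB_result]
          | some c =>
              by_cases hc : c = ""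
              · simp [hc, pvB_result]
              · simp only [if_neg hc, content_phase_eq (PySem.Str.upper c)]
                cases pvB_KW_RULES.find? (fun r => PySem.Str.isIn r.1 (PySem.Str.upper c)) <;> simp [pvB_result]
  | none =>
      simp only [hE]
      cases content with
      | none => simp [pvB_result]
      | some c =>
          by_cases hc : c = ""
          · simp [hc, pvB_result]
          · simp only [if_neg hc, content_phase_eq (PySem.Str.upper c)]
            cases pvB_KW_RULES.find? (fun r => PySem.Str.isIn r.1 (PySem.Str.upper c)) <;> simp [pvB_result]
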